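-- pv_equiv track=rewrite | github.com/Pannagendra/DailyCoding | p64.py | maximizeMedian
-- ===== SOURCE A (Python) =====
-- def maximizeMedian(arr, k):
--     arr.sort()
--     n = len(arr)
--
--     def isPossible(target):
--         used = 0
--         if n % 2 == 1:
--             # For odd length: raise elements from median index onward
--             mid = n // 2
--             for i in range(mid, n):
--                 if arr[i] < target:
--                     used += target - arr[i]
--         else:
--             # For even length: both middle elements plus elements to the right
--             left_mid = n // 2 - 1
--             right_mid = n // 2
--             if arr[right_mid] <= target:
--                 used += max(0, target - arr[right_mid])
--                 used += max(0, target - arr[left_mid])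
--             else:
--                 used += max(0, 2 * target - (arr[right_mid] + arr[left_mid]))
--             for i in range(right_mid + 1, n):
--                 if arr[i] < target:
--                     used += target - arr[i]
--         return used <= k
--
--     # Compute initial median as floor of average of middle two (if even)
--     if n % 2 == 1:
--         iniMedian = arr[n // 2]
--     else:
--         iniMedian = (arr[n // 2] + arr[n // 2 - 1]) // 2
--
--     left, right = iniMedian, iniMedian + k
--     answer = iniMedian
--
--     while left <= right:
--         mid = (left + right) // 2
--         if isPossible(mid):
--             answer = mid
--             left = mid + 1
--         else:
--             right = mid - 1
--
--     return answer
-- ===== SOURCE B (Python) =====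
-- def maximizeMedian(arr, k):
--     # Greedy water-filling on the multiset of "levels" instead of binary search.
--     # (Like A, this sorts arr in place.)
--     arr.sort()
--     n = len(arr)
--     if n % 2 == 1:
--         ini = arr[n // 2]
--         levels = arr[n // 2:]
--     else:
--         s = arr[n // 2] + arr[n // 2 - 1]
--         ini = s // 2
--         # the middle pair costs max(0, 2t - s) to push its floor-average to t,
--         # which equals the cost of two pseudo-elements floor(s/2) and ceil(s/2)
--         levels = [s // 2, s - s // 2] + arr[n // 2 + 1:]
--     if k <= 0:
--         return ini
--     level = levels[0]
--     rem = k
--     for j in range(1, len(levels)):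
--         step = (levels[j] - level) * j
--         if step <= rem:
--             rem -= step
--             level = levels[j]
--         else:
--             return level + rem // j
--     return level + rem // len(levels)
-- ===== Notes on version B (the rewrite author's own statement) =====
-- stated objective: faster
-- what changed: Replaces A's binary search over the target value (each probe rescanning the upper half of the sorted array) with a single greedy water-filling pass over the sorted upper half, folding the even-length middle pair into two pseudo-elements floor(s/2) and ceil(s/2).
import Mathlib
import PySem

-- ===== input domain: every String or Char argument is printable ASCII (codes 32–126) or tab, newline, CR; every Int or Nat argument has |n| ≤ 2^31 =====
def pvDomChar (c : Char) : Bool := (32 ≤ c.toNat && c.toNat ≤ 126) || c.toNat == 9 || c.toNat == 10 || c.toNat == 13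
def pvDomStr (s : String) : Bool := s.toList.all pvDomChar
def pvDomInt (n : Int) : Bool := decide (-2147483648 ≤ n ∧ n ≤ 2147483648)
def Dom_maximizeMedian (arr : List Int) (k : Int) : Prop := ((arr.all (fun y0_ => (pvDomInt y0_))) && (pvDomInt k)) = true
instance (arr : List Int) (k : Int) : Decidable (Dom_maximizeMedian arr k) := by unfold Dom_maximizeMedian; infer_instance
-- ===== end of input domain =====

-- B replaces A's binary search over the target value with one greedy water-filling
-- pass over the sorted upper half; like A it sorts its list argument in place in
-- Python (the theorems are about the return value).


-- ===== PORT A =====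
-- isPossible's `used` computation (closure over the sorted arr; `target` is the probe)
def pvUsedA (s : List Int) (target : Int) : Int :=
  if PySem.Int.mod (s.length : Int) 2 == 1 then
    (PySem.List.pyRange (PySem.Int.floordiv (s.length : Int) 2) (s.length : Int) 1).foldl
      (fun used i =>
        if PySem.List.pyGetD s i 0 < target then used + (target - PySem.List.pyGetD s i 0) else used) 0
  else
    (PySem.List.pyRange (PySem.Int.floordiv (s.length : Int) 2 + 1) (s.length : Int) 1).foldl
      (fun used i =>
        if PySem.List.pyGetD s i 0 < target then used + (target - PySem.List.pyGetD s i 0) else used)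
      (if PySem.List.pyGetD s (PySem.Int.floordiv (s.length : Int) 2) 0 ≤ target then
        max 0 (target - PySem.List.pyGetD s (PySem.Int.floordiv (s.length : Int) 2) 0)
          + max 0 (target - PySem.List.pyGetD s (PySem.Int.floordiv (s.length : Int) 2 - 1) 0)
      else
        max 0 (2 * target - (PySem.List.pyGetD s (PySem.Int.floordiv (s.length : Int) 2) 0
          + PySem.List.pyGetD s (PySem.Int.floordiv (s.length : Int) 2 - 1) 0)))

-- the `while left <= right` binary-search loop (mid = (left + right) // 2 inlined)
def pvSearchA (s : List Int) (k left right answer : Int) : Int :=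
  if h : left ≤ right then
    if pvUsedA s (PySem.Int.floordiv (left + right) 2) ≤ k then
      pvSearchA s k (PySem.Int.floordiv (left + right) 2 + 1) right
        (PySem.Int.floordiv (left + right) 2)
    else
      pvSearchA s k left (PySem.Int.floordiv (left + right) 2 - 1) answer
  else answer
termination_by (right + 1 - left).toNat
decreasing_by
  · have := PySem.Int.floordiv_two_mid_bounds h
    omega
  · have := PySem.Int.floordiv_two_mid_bounds h
    omega

def maximizeMedian (arr : List Int) (k : Int) : Int :=
  let s := PySem.List.sorted arr (fun x => x) false
  let ini : Int :=
    if PySem.Int.mod (s.length : Int) 2 == 1 then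
      PySem.List.pyGetD s (PySem.Int.floordiv (s.length : Int) 2) 0
    else
      PySem.Int.floordiv
        (PySem.List.pyGetD s (PySem.Int.floordiv (s.length : Int) 2) 0
          + PySem.List.pyGetD s (PySem.Int.floordiv (s.length : Int) 2 - 1) 0) 2
  pvSearchA s k ini (ini + k) ini

-- ===== PORT B =====
-- the water-filling loop `for j in range(1, len(levels))` of Source B
def pvWF : List Int → Int → Int → Int → Int
  | [], j, level, rem => level + PySem.Int.floordiv rem j
  | x :: rest, j, level, rem =>
    if (x - level) * j ≤ rem then pvWF rest (j + 1) x (rem - (x - level) * j)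
    else level + PySem.Int.floordiv rem j

def maximizeMedian_alt (arr : List Int) (k : Int) : Int :=
  let s := PySem.List.sorted arr (fun x => x) false
  let p : Int × List Int :=
    if PySem.Int.mod (s.length : Int) 2 == 1 then
      (PySem.List.pyGetD s (PySem.Int.floordiv (s.length : Int) 2) 0,
       PySem.List.slice s (some (PySem.Int.floordiv (s.length : Int) 2)) none)
    else
      (PySem.Int.floordiv
        (PySem.List.pyGetD s (PySem.Int.floordiv (s.length : Int) 2) 0
          + PySem.List.pyGetD s (PySem.Int.floordiv (s.length : Int) 2 - 1) 0) 2,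
       PySem.Int.floordiv
        (PySem.List.pyGetD s (PySem.Int.floordiv (s.length : Int) 2) 0
          + PySem.List.pyGetD s (PySem.Int.floordiv (s.length : Int) 2 - 1) 0) 2 ::
       ((PySem.List.pyGetD s (PySem.Int.floordiv (s.length : Int) 2) 0
          + PySem.List.pyGetD s (PySem.Int.floordiv (s.length : Int) 2 - 1) 0)
        - PySem.Int.floordiv
            (PySem.List.pyGetD s (PySem.Int.floordiv (s.length : Int) 2) 0
              + PySem.List.pyGetD s (PySem.Int.floordiv (s.length : Int) 2 - 1) 0) 2) ::
       PySem.List.slice s (some (PySem.Int.floordiv (s.length : Int) 2 + 1)) none)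
  if k ≤ 0 then p.1
  else pvWF (p.2.drop 1) 1 (PySem.List.pyGetD p.2 0 0) k

-- ===== PRECONDITION & SPEC =====
-- Pre_ excludes only the empty list, on which A raises IndexError (arr[n // 2]).
def Pre_maximizeMedian (arr : List Int) (k : Int) : Prop := arr ≠ []
instance (arr : List Int) (k : Int) : Decidable (Pre_maximizeMedian arr k) := by
  unfold Pre_maximizeMedian; infer_instance
def pvWitness_maximizeMedian : List Int × Int := ([3, 1, 4, 1], 5)

def Spec_maximizeMedian (arr : List Int) (k : Int) (out : Int) : Prop := out = maximizeMedian_alt arr k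
instance (arr : List Int) (k : Int) (out : Int) : Decidable (Spec_maximizeMedian arr k out) := by
  unfold Spec_maximizeMedian; infer_instance

-- ===== CLAIM (what is proved, stated in full; the proofs are below) =====
def Claim_equal_maximizeMedian : Prop := ∀ (arr : List Int) (k : Int), Dom_maximizeMedian arr k → Pre_maximizeMedian arr k → Spec_maximizeMedian arr k (maximizeMedian arr k)

-- ===== LEMMAS AND PROOFS =====

-- total cost of raising every element of l that is below t up to t
def pvCost (l : List Int) (t : Int) : Int := (l.map (fun x => max 0 (t - x))).sum

-- the unique answer: largest t whose cost stays within the budget k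
def pvGood (l : List Int) (k t : Int) : Prop := pvCost l t ≤ k ∧ k < pvCost l (t + 1)

lemma pvCost_nil (t : Int) : pvCost [] t = 0 := rfl

lemma pvCost_cons (x : Int) (l : List Int) (t : Int) :
    pvCost (x :: l) t = max 0 (t - x) + pvCost l t := rfl

lemma pvCost_append (l1 l2 : List Int) (t : Int) :
    pvCost (l1 ++ l2) t = pvCost l1 t + pvCost l2 t := by
  simp [pvCost]

lemma pvCost_mono (l : List Int) {t t' : Int} (h : t ≤ t') : pvCost l t ≤ pvCost l t' := by
  induction l with
  | nil => simp [pvCost_nil]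
  | cons x l ih =>
    rw [pvCost_cons, pvCost_cons]
    have : max 0 (t - x) ≤ max 0 (t' - x) := by omega
    omega

lemma pvCost_zero_of_le (l : List Int) (t : Int) (h : ∀ x ∈ l, t ≤ x) : pvCost l t = 0 := by
  induction l with
  | nil => exact pvCost_nil t
  | cons x l ih =>
    rw [pvCost_cons, ih (fun y hy => h y (List.mem_cons_of_mem _ hy))]
    have := h x (List.mem_cons_self ..)
    omega

lemma pvCost_ge_of_mem {l : List Int} {x : Int} (hx : x ∈ l) (t : Int) : t - x ≤ pvCost l t := by
  induction l with
  | nil => simp at hx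
  | cons y l ih =>
    rw [pvCost_cons]
    have hnn : 0 ≤ pvCost l t := by
      apply List.sum_nonneg
      intro a ha
      simp only [List.mem_map] at ha
      obtain ⟨z, _, rfl⟩ := ha
      omega
    rcases List.mem_cons.mp hx with rfl | hx'
    · omega
    · have h1 := ih hx'
      have h2 : (0 : Int) ≤ max 0 (t - y) := le_max_left 0 _
      omega

lemma pvGood_unique {l : List Int} {k t t' : Int} (h : pvGood l k t) (h' : pvGood l k t') :
    t = t' := by
  by_contra hne
  rcases lt_or_gt_of_ne hne with hlt | hlt
  · have := pvCost_mono l (show t + 1 ≤ t' by omega)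
    have := h.2
    have := h'.1
    omega
  · have := pvCost_mono l (show t' + 1 ≤ t by omega)
    have := h'.2
    have := h.1
    omega

lemma pvCost_shift (l : List Int) (level d : Int) (hl : ∀ x ∈ l, x ≤ level) (hd : 0 ≤ d) :
    pvCost l (level + d) = pvCost l level + l.length * d := by
  induction l with
  | nil => simp [pvCost_nil]
  | cons x l ih =>
    have hx := hl x (List.mem_cons_self ..)
    rw [pvCost_cons, pvCost_cons, ih (fun y hy => hl y (List.mem_cons_of_mem _ hy))]
    have h1 : max 0 (level + d - x) = (level - x) + d := by omega
    have h2 : max 0 (level - x) = level - x := by omega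
    rw [h1, h2]
    simp only [List.length_cons]
    push_cast
    ring

-- both exits of the water-filling loop land on the greatest affordable level
lemma pvExit_good (pre tl : List Int) (level rem k : Int)
    (hpre : pre ≠ []) (hple : ∀ x ∈ pre, x ≤ level)
    (hrem : 0 ≤ rem) (hbase : pvCost pre level = k - rem)
    (htl : ∀ x ∈ tl, rem < (x - level) * pre.length) :
    pvGood (pre ++ tl) k (level + PySem.Int.floordiv rem (pre.length : Int)) := by
  have hj : (0 : Int) < (pre.length : Int) := by
    have := List.length_pos_iff.mpr hpre
    exact_mod_cast this
  rw [PySem.Int.floordiv_eq_ediv_of_pos hj]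
  have hdm : (pre.length : Int) * (rem / (pre.length : Int)) + rem % (pre.length : Int) = rem :=
    Int.ediv_add_emod rem (pre.length : Int)
  have hm0 : 0 ≤ rem % (pre.length : Int) := Int.emod_nonneg rem (ne_of_gt hj)
  have hmlt : rem % (pre.length : Int) < (pre.length : Int) := Int.emod_lt_of_pos rem hj
  have hd0 : 0 ≤ rem / (pre.length : Int) := Int.ediv_nonneg hrem (le_of_lt hj)
  have hxall : ∀ x ∈ tl, level + rem / (pre.length : Int) + 1 ≤ x := by
    intro x hx
    have h1 := htl x hx
    by_contra hc
    push_neg at hc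
    have h2 : x - level ≤ rem / (pre.length : Int) := by omega
    have h3 : (x - level) * (pre.length : Int) ≤ (rem / (pre.length : Int)) * (pre.length : Int) :=
      mul_le_mul_of_nonneg_right h2 (le_of_lt hj)
    have h4 : (rem / (pre.length : Int)) * (pre.length : Int)
        = (pre.length : Int) * (rem / (pre.length : Int)) := mul_comm _ _
    omega
  constructor
  · rw [pvCost_append, pvCost_shift pre level _ hple hd0,
      pvCost_zero_of_le tl _ (fun x hx => by have := hxall x hx; omega)]
    omega
  · rw [show level + rem / (pre.length : Int) + 1 = level + (rem / (pre.length : Int) + 1) by ring,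
      pvCost_append, pvCost_shift pre level _ hple (by omega),
      pvCost_zero_of_le tl _ (fun x hx => by have := hxall x hx; omega)]
    have hexp : (pre.length : Int) * (rem / (pre.length : Int) + 1)
        = (pre.length : Int) * (rem / (pre.length : Int)) + (pre.length : Int) := by ring
    omega

-- loop invariant of pvWF: `pre` are the levels already flooded (all ≤ level),
-- `rem = k - cost(pre, level)`, and the rest is the sorted remainder
lemma pvWF_good (rest : List Int) (pre : List Int) (level rem k : Int)
    (hpre : pre ≠ []) (hple : ∀ x ∈ pre, x ≤ level)
    (hrest : List.Pairwise (· ≤ ·) rest) (hge : ∀ x ∈ rest, level ≤ x)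
    (hrem : 0 ≤ rem) (hbase : pvCost pre level = k - rem) :
    pvGood (pre ++ rest) k (pvWF rest (pre.length : Int) level rem) := by
  induction rest generalizing pre level rem with
  | nil =>
    simp only [pvWF]
    exact pvExit_good pre [] level rem k hpre hple hrem hbase (by simp)
  | cons x rest ih =>
    simp only [pvWF]
    have hlx : level ≤ x := hge x (List.mem_cons_self ..)
    rcases List.pairwise_cons.mp hrest with ⟨hxrest, hrest'⟩
    by_cases hc : (x - level) * (pre.length : Int) ≤ rem
    · rw [if_pos hc]
      have e1 : pvCost pre x = pvCost pre level + (pre.length : Int) * (x - level) := by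
        have := pvCost_shift pre level (x - level) hple (by omega)
        rwa [show level + (x - level) = x by ring] at this
      have hbase' : pvCost (pre ++ [x]) x = k - (rem - (x - level) * (pre.length : Int)) := by
        rw [pvCost_append, e1, hbase, pvCost_cons, pvCost_nil]
        have hz : max 0 (x - x) = 0 := by omega
        rw [hz]
        ring
      have key := ih (pre ++ [x]) x (rem - (x - level) * (pre.length : Int))
        (by simp)
        (by
          intro y hy
          rcases List.mem_append.mp hy with hy' | hy'
          · exact le_trans (hple y hy') hlx
          · simp at hy'; omega)
        hrest'
        (fun y hy => hxrest y hy)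
        (by omega) hbase'
      rw [List.append_assoc, List.singleton_append] at key
      have hlen : (((pre ++ [x]).length : Nat) : Int) = (pre.length : Int) + 1 := by
        simp
      rw [hlen] at key
      exact key
    · rw [if_neg hc]
      push_neg at hc
      apply pvExit_good pre (x :: rest) level rem k hpre hple hrem hbase
      intro y hy
      rcases List.mem_cons.mp hy with rfl | hy'
      · exact hc
      · have hxy : x ≤ y := hxrest y hy'
        have : (x - level) * (pre.length : Int) ≤ (y - level) * (pre.length : Int) := by
          apply mul_le_mul_of_nonneg_right (by omega)
          positivity
        omega

-- the levels multiset A's isPossible charges against, and the starting median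
def pvLevels (s : List Int) : List Int :=
  if s.length % 2 = 1 then s.drop (s.length / 2)
  else
    (s.getD (s.length / 2) 0 + s.getD (s.length / 2 - 1) 0) / 2 ::
    (s.getD (s.length / 2) 0 + s.getD (s.length / 2 - 1) 0
      - (s.getD (s.length / 2) 0 + s.getD (s.length / 2 - 1) 0) / 2) ::
    s.drop (s.length / 2 + 1)

def pvIni (s : List Int) : Int :=
  if s.length % 2 = 1 then s.getD (s.length / 2) 0
  else (s.getD (s.length / 2) 0 + s.getD (s.length / 2 - 1) 0) / 2

lemma pvFoldl_if_eq_pvCost (l : List Int) (t init : Int) :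
    l.foldl (fun used a => if a < t then used + (t - a) else used) init = init + pvCost l t := by
  have he : (fun (used : Int) (a : Int) => if a < t then used + (t - a) else used)
      = fun used a => used + max 0 (t - a) := by
    funext u a
    split_ifs <;> omega
  rw [he, PySem.List.foldl_add]
  rfl

lemma pvCast_floordiv (m : Nat) : PySem.Int.floordiv ((m : Nat) : Int) 2 = ((m / 2 : Nat) : Int) := by
  exact_mod_cast PySem.Int.floordiv_natCast m 2

lemma pvCast_mod (m : Nat) : PySem.Int.mod ((m : Nat) : Int) 2 = ((m % 2 : Nat) : Int) := by
  exact_mod_cast PySem.Int.mod_natCast m 2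

lemma pvUsedA_eq (s : List Int) (hs : s ≠ []) (hp : List.Pairwise (· ≤ ·) s) (t : Int) :
    pvUsedA s t = pvCost (pvLevels s) t := by
  have hm : 0 < s.length := List.length_pos_iff.mpr hs
  simp only [pvUsedA, pvLevels, pvCast_mod, pvCast_floordiv]
  rcases Nat.even_or_odd s.length with he | ho
  · -- even length
    have hpar : s.length % 2 = 0 := Nat.even_iff.mp he
    have hhalf : 1 ≤ s.length / 2 := by omega
    have hhalf2 : s.length / 2 < s.length := by omega
    have halm : s.getD (s.length / 2 - 1) 0 ≤ s.getD (s.length / 2) 0 := by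
      rw [List.getD_eq_getElem s 0 (by omega), List.getD_eq_getElem s 0 hhalf2]
      exact List.pairwise_iff_getElem.mp hp (s.length / 2 - 1) (s.length / 2) (by omega) hhalf2 (by omega)
    rw [if_neg (show ¬((((s.length % 2 : Nat) : Int)) == (1 : Int)) = true by simp [hpar]),
      if_neg (show ¬(s.length % 2 = 1) by omega)]
    have hidx : ((s.length / 2 : Nat) : Int) - 1 = (((s.length / 2 - 1 : Nat)) : Int) := by omega
    rw [hidx, PySem.List.pyGetD_natCast, PySem.List.pyGetD_natCast]
    have hstart : ((s.length / 2 : Nat) : Int) + 1 = (((s.length / 2 + 1 : Nat)) : Int) := by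
      push_cast; ring
    rw [hstart,
      PySem.List.foldl_pyRange_pyGetD' s 0
        (fun used a => if a < t then used + (t - a) else used) _ (by positivity),
      Int.toNat_natCast, pvFoldl_if_eq_pvCost, pvCost_cons, pvCost_cons]
    have hq := Int.ediv_add_emod (s.getD (s.length / 2) 0 + s.getD (s.length / 2 - 1) 0) 2
    have hq0 : 0 ≤ (s.getD (s.length / 2) 0 + s.getD (s.length / 2 - 1) 0) % 2 :=
      Int.emod_nonneg _ (by norm_num)
    have hq1 : (s.getD (s.length / 2) 0 + s.getD (s.length / 2 - 1) 0) % 2 < 2 :=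
      Int.emod_lt_of_pos _ (by norm_num)
    split_ifs <;> omega
  · -- odd length
    have hpar : s.length % 2 = 1 := Nat.odd_iff.mp ho
    rw [if_pos (show ((((s.length % 2 : Nat) : Int)) == (1 : Int)) = true by simp [hpar]),
      if_pos (show s.length % 2 = 1 from hpar),
      PySem.List.foldl_pyRange_pyGetD' s 0
        (fun used a => if a < t then used + (t - a) else used) _ (by positivity),
      Int.toNat_natCast, pvFoldl_if_eq_pvCost]
    omega

-- structure of the levels list: headed by the initial median, sorted
lemma pvLevels_struct (s : List Int) (hs : s ≠ []) (hp : List.Pairwise (· ≤ ·) s) :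
    (∃ tl, pvLevels s = pvIni s :: tl) ∧ List.Pairwise (· ≤ ·) (pvLevels s) := by
  have hm : 0 < s.length := List.length_pos_iff.mpr hs
  have hdropP : ∀ n : Nat, List.Pairwise (· ≤ ·) (s.drop n) :=
    fun n => hp.sublist (List.drop_sublist n s)
  rcases Nat.even_or_odd s.length with he | ho
  · have hpar : s.length % 2 = 0 := Nat.even_iff.mp he
    have hhalf : 1 ≤ s.length / 2 := by omega
    have hhalf2 : s.length / 2 < s.length := by omega
    have halm : s.getD (s.length / 2 - 1) 0 ≤ s.getD (s.length / 2) 0 := by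
      rw [List.getD_eq_getElem s 0 (by omega), List.getD_eq_getElem s 0 hhalf2]
      exact List.pairwise_iff_getElem.mp hp (s.length / 2 - 1) (s.length / 2) (by omega) hhalf2 (by omega)
    have hdrop : s.drop (s.length / 2) = s[s.length / 2] :: s.drop (s.length / 2 + 1) :=
      List.drop_eq_getElem_cons hhalf2
    have hrm : ∀ y ∈ s.drop (s.length / 2 + 1), s.getD (s.length / 2) 0 ≤ y := by
      have hpw := hdropP (s.length / 2)
      rw [hdrop] at hpw
      rw [List.getD_eq_getElem s 0 hhalf2]
      exact (List.pairwise_cons.mp hpw).1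
    have hq := Int.ediv_add_emod (s.getD (s.length / 2) 0 + s.getD (s.length / 2 - 1) 0) 2
    have hq0 : 0 ≤ (s.getD (s.length / 2) 0 + s.getD (s.length / 2 - 1) 0) % 2 :=
      Int.emod_nonneg _ (by norm_num)
    have hq1 : (s.getD (s.length / 2) 0 + s.getD (s.length / 2 - 1) 0) % 2 < 2 :=
      Int.emod_lt_of_pos _ (by norm_num)
    constructor
    · refine ⟨(s.getD (s.length / 2) 0 + s.getD (s.length / 2 - 1) 0
          - (s.getD (s.length / 2) 0 + s.getD (s.length / 2 - 1) 0) / 2) ::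
          s.drop (s.length / 2 + 1), ?_⟩
      unfold pvLevels pvIni
      rw [if_neg (by omega), if_neg (by omega)]
    · unfold pvLevels
      rw [if_neg (by omega)]
      apply List.Pairwise.cons
      · intro y hy
        rcases List.mem_cons.mp hy with rfl | hy'
        · omega
        · have := hrm y hy'
          omega
      apply List.Pairwise.cons
      · intro y hy
        have := hrm y hy
        omega
      · exact hdropP _
  · have hpar : s.length % 2 = 1 := Nat.odd_iff.mp ho
    have hhalf2 : s.length / 2 < s.length := by omega
    have hdrop : s.drop (s.length / 2) = s[s.length / 2] :: s.drop (s.length / 2 + 1) :=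
      List.drop_eq_getElem_cons hhalf2
    constructor
    · refine ⟨s.drop (s.length / 2 + 1), ?_⟩
      unfold pvLevels pvIni
      rw [if_pos (by omega), if_pos (by omega), hdrop, List.getD_eq_getElem s 0 hhalf2]
    · unfold pvLevels
      rw [if_pos (by omega)]
      exact hdropP _

lemma pvIni_le_levels (s : List Int) (hs : s ≠ []) (hp : List.Pairwise (· ≤ ·) s) :
    ∀ x ∈ pvLevels s, pvIni s ≤ x := by
  obtain ⟨⟨tl, htl⟩, hpw⟩ := pvLevels_struct s hs hp
  intro x hx
  rw [htl] at hx hpw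
  rcases List.mem_cons.mp hx with rfl | hx'
  · exact le_refl _
  · exact (List.pairwise_cons.mp hpw).1 x hx'

lemma pvIni_mem_levels (s : List Int) (hs : s ≠ []) (hp : List.Pairwise (· ≤ ·) s) :
    pvIni s ∈ pvLevels s := by
  obtain ⟨⟨tl, htl⟩, _⟩ := pvLevels_struct s hs hp
  rw [htl]
  exact List.mem_cons_self ..

-- the binary-search loop: bracketing properties of its result
lemma pvSearchA_spec (s : List Int) (k : Int)
    (hmono : ∀ {t t' : Int}, t ≤ t' → pvUsedA s t ≤ pvUsedA s t') :
    ∀ (N : Nat) (left right answer : Int), (right + 1 - left).toNat ≤ N →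
      pvUsedA s answer ≤ k → answer ≤ left → left - 1 ≤ answer →
      pvUsedA s (pvSearchA s k left right answer) ≤ k ∧
      answer ≤ pvSearchA s k left right answer ∧
      (∀ t, pvSearchA s k left right answer < t → t ≤ right → k < pvUsedA s t) ∧
      (pvSearchA s k left right answer = answer ∨ pvSearchA s k left right answer ≤ right) := by
  intro N
  induction N with
  | zero =>
    intro left right answer hN hans hal hal2
    have hlr : ¬ left ≤ right := by omega
    rw [pvSearchA, dif_neg hlr]
    exact ⟨hans, le_refl _, fun t ht ht' => by omega, Or.inl rfl⟩
  | succ N ih =>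
    intro left right answer hN hans hal hal2
    rw [pvSearchA]
    by_cases hlr : left ≤ right
    · rw [dif_pos hlr]
      have hmid := PySem.Int.floordiv_two_mid_bounds hlr
      by_cases hpos : pvUsedA s (PySem.Int.floordiv (left + right) 2) ≤ k
      · rw [if_pos hpos]
        obtain ⟨c1, c2, c3, c4⟩ := ih (PySem.Int.floordiv (left + right) 2 + 1) right
          (PySem.Int.floordiv (left + right) 2) (by omega) hpos (by omega) (by omega)
        refine ⟨c1, by omega, c3, ?_⟩
        rcases c4 with h | h
        · right; omega
        · right; exact h
      · rw [if_neg hpos]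
        obtain ⟨c1, c2, c3, c4⟩ :=
          ih left (PySem.Int.floordiv (left + right) 2 - 1) answer (by omega) hans hal hal2
        refine ⟨c1, c2, ?_, ?_⟩
        · intro t ht ht'
          by_cases htm : t ≤ PySem.Int.floordiv (left + right) 2 - 1
          · exact c3 t ht htm
          · have h1 : PySem.Int.floordiv (left + right) 2 ≤ t := by omega
            have := hmono h1
            omega
        · rcases c4 with h | h
          · exact Or.inl h
          · right; omega
    · rw [dif_neg hlr]
      exact ⟨hans, le_refl _, fun t ht ht' => by omega, Or.inl rfl⟩

-- port A, re-expressed through pvIni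
lemma maximizeMedian_eq (arr : List Int) (k : Int) (harr : arr ≠ []) :
    maximizeMedian arr k =
      pvSearchA (PySem.List.sorted arr (fun x => x) false) k
        (pvIni (PySem.List.sorted arr (fun x => x) false))
        (pvIni (PySem.List.sorted arr (fun x => x) false) + k)
        (pvIni (PySem.List.sorted arr (fun x => x) false)) := by
  have hs : PySem.List.sorted arr (fun x => x) false ≠ [] := by
    rw [Ne, PySem.List.sorted_eq_nil_iff]
    exact harr
  set s := PySem.List.sorted arr (fun x => x) false with hsdef
  have hm : 0 < s.length := List.length_pos_iff.mpr hs
  simp only [maximizeMedian, ← hsdef, pvIni, pvCast_mod, pvCast_floordiv]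
  rcases Nat.even_or_odd s.length with he | ho
  · have hpar : s.length % 2 = 0 := Nat.even_iff.mp he
    have hhalf : 1 ≤ s.length / 2 := by omega
    rw [if_neg (show ¬((((s.length % 2 : Nat) : Int)) == (1 : Int)) = true by simp [hpar]),
      if_neg (show ¬(s.length % 2 = 1) by omega)]
    have hidx : ((s.length / 2 : Nat) : Int) - 1 = (((s.length / 2 - 1 : Nat)) : Int) := by omega
    rw [hidx, PySem.List.pyGetD_natCast, PySem.List.pyGetD_natCast,
      PySem.Int.floordiv_eq_ediv_of_pos (by norm_num : (0:Int) < 2)]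
  · have hpar : s.length % 2 = 1 := Nat.odd_iff.mp ho
    rw [if_pos (show ((((s.length % 2 : Nat) : Int)) == (1 : Int)) = true by simp [hpar]),
      if_pos (show s.length % 2 = 1 from hpar), PySem.List.pyGetD_natCast]

-- port B, re-expressed through pvIni / pvLevels
lemma maximizeMedian_alt_eq (arr : List Int) (k : Int) (harr : arr ≠ []) :
    maximizeMedian_alt arr k =
      if k ≤ 0 then pvIni (PySem.List.sorted arr (fun x => x) false)
      else pvWF ((pvLevels (PySem.List.sorted arr (fun x => x) false)).drop 1) 1
        (pvIni (PySem.List.sorted arr (fun x => x) false)) k := by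
  have hs : PySem.List.sorted arr (fun x => x) false ≠ [] := by
    rw [Ne, PySem.List.sorted_eq_nil_iff]
    exact harr
  set s := PySem.List.sorted arr (fun x => x) false with hsdef
  have hm : 0 < s.length := List.length_pos_iff.mpr hs
  have hp : List.Pairwise (· ≤ ·) s := by
    rw [hsdef]
    exact PySem.List.sorted_pairwise arr (fun x => x)
  simp only [maximizeMedian_alt, ← hsdef, pvCast_mod, pvCast_floordiv]
  rcases Nat.even_or_odd s.length with he | ho
  · have hpar : s.length % 2 = 0 := Nat.even_iff.mp he
    have hhalf : 1 ≤ s.length / 2 := by omega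
    rw [if_neg (show ¬((((s.length % 2 : Nat) : Int)) == (1 : Int)) = true by simp [hpar])]
    have hidx : ((s.length / 2 : Nat) : Int) - 1 = (((s.length / 2 - 1 : Nat)) : Int) := by omega
    have hstart : ((s.length / 2 : Nat) : Int) + 1 = (((s.length / 2 + 1 : Nat)) : Int) := by
      push_cast; ring
    rw [hidx, hstart, PySem.List.pyGetD_natCast, PySem.List.pyGetD_natCast,
      PySem.Int.floordiv_eq_ediv_of_pos (by norm_num : (0:Int) < 2),
      PySem.List.slice_from s (by positivity), Int.toNat_natCast]
    have hlev : pvLevels s =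
        (s.getD (s.length / 2) 0 + s.getD (s.length / 2 - 1) 0) / 2 ::
        (s.getD (s.length / 2) 0 + s.getD (s.length / 2 - 1) 0
          - (s.getD (s.length / 2) 0 + s.getD (s.length / 2 - 1) 0) / 2) ::
        s.drop (s.length / 2 + 1) := by
      unfold pvLevels
      rw [if_neg (by omega)]
    have hini : pvIni s = (s.getD (s.length / 2) 0 + s.getD (s.length / 2 - 1) 0) / 2 := by
      unfold pvIni
      rw [if_neg (by omega)]
    rw [hlev, hini]
    simp only [PySem.List.pyGetD_zero_cons, List.drop_one, List.tail_cons]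
  · have hpar : s.length % 2 = 1 := Nat.odd_iff.mp ho
    have hhalf2 : s.length / 2 < s.length := by omega
    rw [if_pos (show ((((s.length % 2 : Nat) : Int)) == (1 : Int)) = true by simp [hpar]),
      PySem.List.pyGetD_natCast,
      PySem.List.slice_from s (by positivity), Int.toNat_natCast]
    have hdrop : s.drop (s.length / 2) = s[s.length / 2] :: s.drop (s.length / 2 + 1) :=
      List.drop_eq_getElem_cons hhalf2
    have hlev : pvLevels s = s.drop (s.length / 2) := by
      unfold pvLevels
      rw [if_pos (by omega)]
    have hini : pvIni s = s.getD (s.length / 2) 0 := by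
      unfold pvIni
      rw [if_pos (by omega)]
    rw [hlev, hini, hdrop, List.getD_eq_getElem s 0 hhalf2]
    simp only [PySem.List.pyGetD_zero_cons, List.drop_one, List.tail_cons]

-- ===== VERDICT (by name: the statement is the Claim_ definition above) =====
theorem maximizeMedian_spec : Claim_equal_maximizeMedian := by
  unfold Claim_equal_maximizeMedian
  intro arr k _hdom hpre
  unfold Spec_maximizeMedian
  have harr : arr ≠ [] := hpre
  have hs : PySem.List.sorted arr (fun x => x) false ≠ [] := by
    rw [Ne, PySem.List.sorted_eq_nil_iff]
    exact harr
  rw [maximizeMedian_eq arr k harr, maximizeMedian_alt_eq arr k harr]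
  set s := PySem.List.sorted arr (fun x => x) false with hsdef
  have hp : List.Pairwise (· ≤ ·) s := by
    rw [hsdef]
    exact PySem.List.sorted_pairwise arr (fun x => x)
  obtain ⟨⟨tl, htl⟩, hpw⟩ := pvLevels_struct s hs hp
  have hmono : ∀ {t t' : Int}, t ≤ t' → pvUsedA s t ≤ pvUsedA s t' := by
    intro t t' h
    rw [pvUsedA_eq s hs hp, pvUsedA_eq s hs hp]
    exact pvCost_mono _ h
  by_cases hk : k < 0
  · rw [if_pos (by omega), pvSearchA, dif_neg (by omega)]
  · have hini_cost : pvCost (pvLevels s) (pvIni s) = 0 :=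
      pvCost_zero_of_le _ _ (pvIni_le_levels s hs hp)
    have hused_ini : pvUsedA s (pvIni s) ≤ k := by
      rw [pvUsedA_eq s hs hp, hini_cost]
      omega
    obtain ⟨c1, c2, c3, c4⟩ := pvSearchA_spec s k hmono (k + 1).toNat
      (pvIni s) (pvIni s + k) (pvIni s) (by omega) hused_ini (le_refl _) (by omega)
    have hAgood : pvGood (pvLevels s) k (pvSearchA s k (pvIni s) (pvIni s + k) (pvIni s)) := by
      constructor
      · rw [← pvUsedA_eq s hs hp]
        exact c1
      · by_cases hr : pvSearchA s k (pvIni s) (pvIni s + k) (pvIni s) + 1 ≤ pvIni s + k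
        · have := c3 (pvSearchA s k (pvIni s) (pvIni s + k) (pvIni s) + 1) (by omega) hr
          rw [pvUsedA_eq s hs hp] at this
          exact this
        · have hrle : pvSearchA s k (pvIni s) (pvIni s + k) (pvIni s) ≤ pvIni s + k := by
            rcases c4 with h | h
            · omega
            · exact h
          have := pvCost_ge_of_mem (pvIni_mem_levels s hs hp)
            (pvSearchA s k (pvIni s) (pvIni s + k) (pvIni s) + 1)
          omega
    by_cases hk0 : k ≤ 0
    · rw [if_pos hk0]
      have hBgood : pvGood (pvLevels s) k (pvIni s) := by
        constructor
        · rw [hini_cost]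
          omega
        · have := pvCost_ge_of_mem (pvIni_mem_levels s hs hp) (pvIni s + 1)
          omega
      exact pvGood_unique hAgood hBgood
    · rw [if_neg hk0]
      have hBgood : pvGood (pvLevels s) k (pvWF ((pvLevels s).drop 1) 1 (pvIni s) k) := by
        rw [htl]
        have hcons : List.Pairwise (· ≤ ·) (pvIni s :: tl) := htl ▸ hpw
        have := pvWF_good tl [pvIni s] (pvIni s) k k (by simp) (by simp)
          (List.pairwise_cons.mp hcons).2 (List.pairwise_cons.mp hcons).1 (by omega)
          (by
            rw [pvCost_cons, pvCost_nil]
            omega)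
        simpa using this
      exact pvGood_unique hAgood hBgood
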